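-- pv_equiv track=rewrite | github.com/acharya-aayush/6th_sem_Labs | Compiler/aayush04lab3.py | lexical_analyzer
-- ===== SOURCE A (Python) =====
-- def lexical_analyzer(code):
--     tokens, current = [], ""
--     for char in code:
--         if char in [' ', '\t', '\n']:
--             if current: tokens.append(current); current=""
--         else:
--             current += char
--     if current: tokens.append(current)
--     return tokens
-- ===== SOURCE B (Python) =====
-- import re
--
-- def lexical_analyzer(code):
--     return re.findall(r'[^ \t\n]+', code)
-- ===== Notes on version B (the rewrite author's own statement) =====
-- stated objective: idiomatic
-- what changed: Replaced the per-character accumulator loop with a single regex pass (re.findall of maximal runs of characters other than space, tab, newline).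
import Mathlib
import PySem

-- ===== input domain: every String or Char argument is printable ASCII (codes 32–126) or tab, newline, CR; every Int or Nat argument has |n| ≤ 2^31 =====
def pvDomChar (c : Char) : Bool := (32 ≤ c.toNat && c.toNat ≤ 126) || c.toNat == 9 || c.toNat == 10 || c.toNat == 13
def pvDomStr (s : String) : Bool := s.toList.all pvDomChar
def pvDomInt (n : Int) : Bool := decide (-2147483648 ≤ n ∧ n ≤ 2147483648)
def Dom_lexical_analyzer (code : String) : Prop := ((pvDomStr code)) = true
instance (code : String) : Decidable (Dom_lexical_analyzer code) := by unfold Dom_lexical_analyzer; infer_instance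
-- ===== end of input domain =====

-- B replaces A's per-character accumulator loop with a single regex-style pass
-- extracting maximal runs of non-delimiter characters (idiomatic, same cost).

-- ===== PORT A =====
-- A's loop body: on ' '/'\t'/'\n' flush the pending token, otherwise extend it.
def pvStepA (st : List String × List Char) (char : Char) : List String × List Char :=
  if char = ' ' || char = '\t' || char = '\n' then
    if st.2 ≠ [] then (st.1 ++ [String.ofList st.2], []) else st
  else
    (st.1, st.2 ++ [char])

-- A's trailing 'if current: tokens.append(current)'.
def pvFinishA (p : List String × List Char) : List String :=
  if p.2 ≠ [] then p.1 ++ [String.ofList p.2] else p.1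

def lexical_analyzer (code : String) : List String :=
  pvFinishA (code.toList.foldl pvStepA ([], []))

-- ===== PORT B =====
def pvIsDelim (c : Char) : Bool := c = ' ' || c = '\t' || c = '\n'

-- findall of the regex [^ \t\n]+: skip delimiters, else take a maximal non-delimiter run.
def pvFindAll : List Char → List String
  | [] => []
  | c :: cs =>
    if pvIsDelim c then pvFindAll cs
    else String.ofList (c :: cs.takeWhile (fun x => !pvIsDelim x)) ::
         pvFindAll (cs.dropWhile (fun x => !pvIsDelim x))
termination_by l => l.length
decreasing_by
  · simp
  · simpa using Nat.lt_succ_of_le (List.length_dropWhile_le _ _)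

def lexical_analyzer_alt (code : String) : List String := pvFindAll code.toList

-- ===== PRECONDITION & SPEC =====
def Spec_lexical_analyzer (code : String) (out : List String) : Prop := out = lexical_analyzer_alt code
instance (code : String) (out : List String) : Decidable (Spec_lexical_analyzer code out) := by unfold Spec_lexical_analyzer; infer_instance

-- ===== CLAIM (what is proved, stated in full; the proofs are below) =====
def Claim_equal_lexical_analyzer : Prop := ∀ (code : String), Dom_lexical_analyzer code → Spec_lexical_analyzer code (lexical_analyzer code)

-- ===== LEMMAS AND PROOFS =====

theorem takeWhile_clean_delim (as : List Char) (d : Char) (rest : List Char)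
    (h : ∀ c ∈ as, pvIsDelim c = false) (hd : pvIsDelim d = true) :
    (as ++ d :: rest).takeWhile (fun x => !pvIsDelim x) = as := by
  induction as with
  | nil => simp [hd]
  | cons b bs ih =>
    have hb := h b (by simp)
    simp [hb, ih (fun c hc => h c (List.mem_cons_of_mem _ hc))]

theorem dropWhile_clean_delim (as : List Char) (d : Char) (rest : List Char)
    (h : ∀ c ∈ as, pvIsDelim c = false) (hd : pvIsDelim d = true) :
    (as ++ d :: rest).dropWhile (fun x => !pvIsDelim x) = d :: rest := by
  induction as with
  | nil => simp [hd]
  | cons b bs ih =>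
    have hb := h b (by simp)
    simp [hb, ih (fun c hc => h c (List.mem_cons_of_mem _ hc))]

-- pvFindAll of a purely non-delimiter list is that list as a single token (or nothing).
theorem pvFindAll_clean (cur : List Char) (h : ∀ c ∈ cur, pvIsDelim c = false) :
    pvFindAll cur = if cur ≠ [] then [String.ofList cur] else [] := by
  cases cur with
  | nil => simp [pvFindAll]
  | cons c cs =>
    have hc := h c (by simp)
    have h' : ∀ x ∈ cs, pvIsDelim x = false := fun x hx => h x (List.mem_cons_of_mem _ hx)
    have htw : cs.takeWhile (fun x => !pvIsDelim x) = cs :=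
      List.takeWhile_eq_self_iff.mpr (fun x hx => by simp [h' x hx])
    have hdw : cs.dropWhile (fun x => !pvIsDelim x) = [] :=
      List.dropWhile_eq_nil_iff.mpr (fun x hx => by simp [h' x hx])
    rw [pvFindAll]
    simp [hc, htw, hdw, pvFindAll]

-- pvFindAll past a clean run followed by a delimiter: one token, then recurse.
theorem pvFindAll_run (cur : List Char) (d : Char) (rest : List Char)
    (hc : cur ≠ []) (h : ∀ c ∈ cur, pvIsDelim c = false) (hd : pvIsDelim d = true) :
    pvFindAll (cur ++ d :: rest) = String.ofList cur :: pvFindAll rest := by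
  cases cur with
  | nil => exact absurd rfl hc
  | cons a as =>
    have ha := h a (by simp)
    have h' : ∀ c ∈ as, pvIsDelim c = false := fun c hcm => h c (List.mem_cons_of_mem _ hcm)
    rw [List.cons_append, pvFindAll]
    rw [takeWhile_clean_delim as d rest h' hd, dropWhile_clean_delim as d rest h' hd]
    rw [pvFindAll]
    simp [ha, hd]

-- Invariant of A's fold: with a non-delimiter pending token `cur`, finishing the fold
-- yields toks followed by the maximal runs of cur ++ l.
theorem loop_invariant (l : List Char) (toks : List String) (cur : List Char)
    (h : ∀ c ∈ cur, pvIsDelim c = false) :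
    pvFinishA (l.foldl pvStepA (toks, cur)) = toks ++ pvFindAll (cur ++ l) := by
  induction l generalizing toks cur with
  | nil =>
    rw [List.foldl_nil, List.append_nil, pvFindAll_clean cur h]
    by_cases hc : cur = [] <;> simp [pvFinishA, hc]
  | cons d rest ih =>
    rw [List.foldl_cons]
    by_cases hd : pvIsDelim d = true
    · have hd' : (d = ' ' || d = '\t' || d = '\n') = true := hd
      by_cases hc : cur = []
      · subst hc
        have hstep : pvStepA (toks, ([] : List Char)) d = (toks, []) := by
          simp [pvStepA, hd']
        rw [hstep, ih toks [] (by simp)]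
        rw [List.nil_append, List.nil_append, pvFindAll]
        simp [hd]
      · have hstep : pvStepA (toks, cur) d = (toks ++ [String.ofList cur], []) := by
          simp [pvStepA, hd', hc]
        rw [hstep, ih (toks ++ [String.ofList cur]) [] (by simp)]
        rw [pvFindAll_run cur d rest hc h hd]
        simp
    · have hd' : (d = ' ' || d = '\t' || d = '\n') = false := by
        simpa [pvIsDelim] using hd
      have hstep : pvStepA (toks, cur) d = (toks, cur ++ [d]) := by
        simp [pvStepA, hd']
      have hcur : ∀ c ∈ cur ++ [d], pvIsDelim c = false := by
        intro c hcm
        rcases List.mem_append.mp hcm with h1 | h1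
        · exact h c h1
        · simp at h1; subst h1; simpa using hd
      rw [hstep, ih toks (cur ++ [d]) hcur]
      simp [List.append_assoc]

-- ===== VERDICT (by name: the statement is the Claim_ definition above) =====
theorem lexical_analyzer_spec : Claim_equal_lexical_analyzer := by
  intro code _
  unfold Spec_lexical_analyzer lexical_analyzer lexical_analyzer_alt
  simpa using loop_invariant code.toList [] [] (by simp)
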